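-- pv_equiv track=rewrite | github.com/CbassT1/bot_facturacion | app/ui/frames/visor_facturas/panel_datos.py | _sanitize_fx_numeric
-- ===== SOURCE A (Python) =====
-- def _sanitize_fx_numeric(s: str) -> str:
--     s = (s or "").replace(",", "").strip()
--     out = []
--     dot_used = False
--     for ch in s:
--         if ch.isdigit():
--             out.append(ch)
--         elif ch == "." and not dot_used:
--             out.append(ch); dot_used = True
--     return "".join(out)
-- ===== SOURCE B (Python) =====
-- def _sanitize_fx_numeric(s: str) -> str:
--     s = (s or "").replace(",", "").strip()
--     head, sep, tail = s.partition(".")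
--     return "".join(c for c in head if c.isdigit()) + sep + "".join(c for c in tail if c.isdigit())
-- ===== Notes on version B (the rewrite author's own statement) =====
-- stated objective: simpler
-- what changed: Replaces the stateful single loop with a dot_used flag by one partition at the first dot and two stateless digit filters on the halves.
import Mathlib
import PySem

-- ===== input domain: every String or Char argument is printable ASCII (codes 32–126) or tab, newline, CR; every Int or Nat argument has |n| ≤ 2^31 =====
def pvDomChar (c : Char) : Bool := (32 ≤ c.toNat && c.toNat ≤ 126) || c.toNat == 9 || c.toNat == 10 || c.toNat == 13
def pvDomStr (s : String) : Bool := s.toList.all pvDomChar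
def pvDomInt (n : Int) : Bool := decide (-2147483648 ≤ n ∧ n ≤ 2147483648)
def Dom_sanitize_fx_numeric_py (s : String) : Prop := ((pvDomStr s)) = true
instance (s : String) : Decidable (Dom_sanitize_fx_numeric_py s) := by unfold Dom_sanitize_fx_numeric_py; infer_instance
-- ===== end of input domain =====

-- B replaces A's stateful loop (dot_used flag) with a partition at the first dot and two
-- stateless digit filters on the halves; objective: simpler decomposition, same cost.

-- ===== PORT A =====
-- the loop body of A: digit → append; first '.' → append and set the flag; else skip
def pvStepA (acc : List Char × Bool) (ch : Char) : List Char × Bool :=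
  if PySem.Chars.isdigit ch then (acc.1 ++ [ch], acc.2)
  else if ch == '.' && !acc.2 then (acc.1 ++ [ch], true)
  else acc

def sanitize_fx_numeric_py (s : String) : String :=
  let s := PySem.Str.strip (PySem.Str.replace s "," "")
  let st := s.toList.foldl pvStepA ([], false)
  String.ofList st.1

-- ===== PORT B =====
def sanitize_fx_numeric_py_alt (s : String) : String :=
  let s := PySem.Str.strip (PySem.Str.replace s "," "")
  let cs := s.toList
  let head := cs.takeWhile (fun c => c != '.')     -- s.partition(".")
  match cs.dropWhile (fun c => c != '.') with
  | [] => String.ofList (head.filter PySem.Chars.isdigit)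
  | _ :: tail => String.ofList (head.filter PySem.Chars.isdigit ++ '.' :: tail.filter PySem.Chars.isdigit)

-- ===== PRECONDITION & SPEC =====
def Spec_sanitize_fx_numeric_py (s : String) (out : String) : Prop := out = sanitize_fx_numeric_py_alt s
instance (s : String) (out : String) : Decidable (Spec_sanitize_fx_numeric_py s out) := by unfold Spec_sanitize_fx_numeric_py; infer_instance

-- ===== CLAIM (what is proved, stated in full; the proofs are below) =====
def Claim_equal_sanitize_fx_numeric_py : Prop := ∀ (s : String), Dom_sanitize_fx_numeric_py s → Spec_sanitize_fx_numeric_py s (sanitize_fx_numeric_py s)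

-- ===== LEMMAS AND PROOFS =====
lemma pvIsdigit_ne_dot {c : Char} (h : PySem.Chars.isdigit c = true) : (c != '.') = true := by
  simp only [bne_iff_ne, ne_eq]
  intro hc; subst hc; simp [PySem.Chars.isdigit] at h

-- with the flag set, the loop just filters digits
lemma pvLoopTrue (cs : List Char) (out : List Char) :
    cs.foldl pvStepA (out, true) = (out ++ cs.filter PySem.Chars.isdigit, true) := by
  induction cs generalizing out with
  | nil => simp
  | cons c cs ih =>
    by_cases h : PySem.Chars.isdigit c = true
    · simp [pvStepA, h, ih]
    · simp [pvStepA, h, ih, Bool.and_false]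

-- with the flag clear, the loop's output is: digits of the part before the first dot,
-- then (if a dot exists) the dot and the digits of the remainder
lemma pvLoopFalse (cs : List Char) (out : List Char) :
    (cs.foldl pvStepA (out, false)).1 =
      out ++ (cs.takeWhile (fun c => c != '.')).filter PySem.Chars.isdigit ++
        (match cs.dropWhile (fun c => c != '.') with
         | [] => []
         | _ :: tail => '.' :: tail.filter PySem.Chars.isdigit) := by
  induction cs generalizing out with
  | nil => simp
  | cons c cs ih =>
    by_cases h : PySem.Chars.isdigit c = true
    · have hne := pvIsdigit_ne_dot h
      simp [pvStepA, h, hne, List.foldl_cons, ih]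
    · by_cases hd : c = '.'
      · subst hd
        simp [pvStepA, h, List.foldl_cons, pvLoopTrue]
      · have hne : (c != '.') = true := by simp [hd]
        simp [pvStepA, h, hne, hd, List.foldl_cons, ih]

-- ===== VERDICT (by name: the statement is the Claim_ definition above) =====
theorem sanitize_fx_numeric_py_spec : Claim_equal_sanitize_fx_numeric_py := by
  intro s _
  unfold Spec_sanitize_fx_numeric_py sanitize_fx_numeric_py sanitize_fx_numeric_py_alt
  simp only []
  rw [pvLoopFalse]
  cases h : (PySem.Str.strip (PySem.Str.replace s "," "")).toList.dropWhile (fun c => c != '.') with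
  | nil => simp
  | cons c tail => simp
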